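-- pv_equiv track=rewrite | github.com/aiden-tepper/introduction-to-algorithms | program 2 - crossing lines/main_divideandconquer.py | Count3
-- ===== SOURCE A (Python) =====
-- def Count3(q1, q2, p1, p2):
--     c3 = 0
--     n1 = len(q1)
--     n2 = len(q2)
--     if n1 == 0 or n2 == 0:
--         return 0
--     for i in range(0, n1):
--         for j in range(0, n2):
--             if q1[i] > q2[j] and p1[i] < p2[j]:
--                 c3 += 1
--             if q1[i] < q2[j] and p1[i] > p2[j]:
--                 c3 += 1
--     return c3
-- ===== SOURCE B (Python) =====
-- def _bisect_right(s, x):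
--     # first index whose element is > x, in the sorted list s (hand-rolled: A imports nothing)
--     lo = 0
--     hi = len(s)
--     while lo < hi:
--         mid = (lo + hi) // 2
--         if s[mid] <= x:
--             lo = mid + 1
--         else:
--             hi = mid
--     return lo
--
--
-- def _cross(sa, sb):
--     # sa, sb sorted by first coordinate; count pairs (a, b) in sa x sb
--     # with a[0] < b[0] and a[1] > b[1], by a sweep over sb keeping the
--     # second coordinates of the already-passed part of sa in a sorted list.
--     s = []
--     c = 0
--     k = 0
--     for qy, py in sb:
--         while k < len(sa) and sa[k][0] < qy:
--             pk = sa[k][1]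
--             s.insert(_bisect_right(s, pk), pk)
--             k += 1
--         c += len(s) - _bisect_right(s, py)
--     return c
--
--
-- def Count3(q1, q2, p1, p2):
--     g1 = sorted(zip(q1, p1), key=lambda t: t[0])
--     g2 = sorted(zip(q2, p2), key=lambda t: t[0])
--     return _cross(g1, g2) + _cross(g2, g1)
-- ===== Notes on version B (the rewrite author's own statement) =====
-- stated objective: faster
-- what changed: Replaces the all-pairs double loop by sorting both groups by q and sweeping each against the other, maintaining the passed p-values in a sorted list with hand-rolled binary search for insertion position and for counting p-values above a threshold.
-- outside the precondition, e.g. on Count3([1], [1], [], []): A returns 0, B returns 0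
import Mathlib
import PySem

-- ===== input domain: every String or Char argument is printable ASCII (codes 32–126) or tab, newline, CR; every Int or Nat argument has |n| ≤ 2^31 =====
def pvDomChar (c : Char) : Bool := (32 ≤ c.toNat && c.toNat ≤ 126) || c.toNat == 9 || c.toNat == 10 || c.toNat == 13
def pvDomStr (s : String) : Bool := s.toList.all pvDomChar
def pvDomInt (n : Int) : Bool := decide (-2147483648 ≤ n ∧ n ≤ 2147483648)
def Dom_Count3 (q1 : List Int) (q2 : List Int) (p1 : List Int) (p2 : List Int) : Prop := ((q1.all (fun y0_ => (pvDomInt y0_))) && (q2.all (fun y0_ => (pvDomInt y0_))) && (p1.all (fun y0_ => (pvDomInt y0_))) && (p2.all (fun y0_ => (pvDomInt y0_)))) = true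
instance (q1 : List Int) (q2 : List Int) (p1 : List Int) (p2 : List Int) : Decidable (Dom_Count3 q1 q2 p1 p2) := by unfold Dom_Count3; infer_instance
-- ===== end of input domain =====

-- B replaces A's all-pairs double loop by sorting both groups by q and sweeping each against
-- the other with a sorted list of passed p-values and binary search (measurably faster).


-- ===== PORT A =====
def Count3 (q1 : List Int) (q2 : List Int) (p1 : List Int) (p2 : List Int) : Int :=
  let n1 : Int := PySem.List.len q1
  let n2 : Int := PySem.List.len q2
  if n1 = 0 ∨ n2 = 0 then 0
  else
    (PySem.List.pyRange 0 n1).foldl (fun c3 i =>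
      (PySem.List.pyRange 0 n2).foldl (fun c3 j =>
        -- index accesses are in range under Pre_, so pyGetD's default is never produced
        let c3 := if PySem.List.pyGetD q1 i 0 > PySem.List.pyGetD q2 j 0 ∧
                     PySem.List.pyGetD p1 i 0 < PySem.List.pyGetD p2 j 0 then c3 + 1 else c3
        if PySem.List.pyGetD q1 i 0 < PySem.List.pyGetD q2 j 0 ∧
           PySem.List.pyGetD p1 i 0 > PySem.List.pyGetD p2 j 0 then c3 + 1 else c3) c3) 0

-- ===== PORT B =====
-- Source B's hand-written _bisect_right, transliterated (lo/hi are nonnegative throughout, so Nat;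
-- s[mid] is always in range when lo < hi ≤ len(s), so getD's default is never produced)
-- the loop runs at most hi - lo times; the fuel argument (always ≥ hi - lo at the call) only
-- makes the recursion structural, it never changes the result
def pvBisAux (s : List Int) (x : Int) : Nat → Nat → Nat → Nat
  | 0, lo, _ => lo
  | fuel + 1, lo, hi =>
    if lo < hi then
      let mid := (lo + hi) / 2
      if s.getD mid 0 ≤ x then pvBisAux s x fuel (mid + 1) hi else pvBisAux s x fuel lo mid
    else lo

def pvBisectRight (s : List Int) (x : Int) : Nat := pvBisAux s x s.length 0 s.length

-- the inner 'while k < len(sa) and sa[k][0] < qy' loop of Source B's _cross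
-- the loop advances k at most len(sa) - k times; fuel (always ≥ that at the call) only makes
-- the recursion structural
def pvAdvance (sa : List (Int × Int)) (qy : Int) : Nat → Nat → List Int → Nat × List Int
  | 0, k, s => (k, s)
  | fuel + 1, k, s =>
    if k < sa.length then
      if (sa.getD k (0, 0)).1 < qy then
        pvAdvance sa qy fuel (k + 1)
          (PySem.List.insert s (pvBisectRight s (sa.getD k (0, 0)).2) (sa.getD k (0, 0)).2)
      else (k, s)
    else (k, s)

-- Source B's _cross: sweep over sb with state (s, c, k)
def pvCross (sa : List (Int × Int)) (sb : List (Int × Int)) : Int :=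
  (sb.foldl (fun (acc : List Int × Int × Nat) y =>
      let ks := pvAdvance sa y.1 sa.length acc.2.2 acc.1
      (ks.2, acc.2.1 + ((ks.2.length : Int) - (pvBisectRight ks.2 y.2 : Int)), ks.1))
    ([], 0, 0)).2.1

def Count3_alt (q1 : List Int) (q2 : List Int) (p1 : List Int) (p2 : List Int) : Int :=
  let g1 := PySem.List.sorted (List.zip q1 p1) (fun t => t.1)
  let g2 := PySem.List.sorted (List.zip q2 p2) (fun t => t.1)
  pvCross g1 g2 + pvCross g2 g1

-- ===== PRECONDITION & SPEC =====
-- Pre_ excludes the inputs where a p-list is shorter than its q-list (with both q-lists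
-- nonempty): there A raises IndexError except in the rare case that every out-of-range p-access
-- is short-circuited by q-ties, where A returns and B agrees anyway (see cites).
def Pre_Count3 (q1 : List Int) (q2 : List Int) (p1 : List Int) (p2 : List Int) : Prop :=
  q1 = [] ∨ q2 = [] ∨ (q1.length ≤ p1.length ∧ q2.length ≤ p2.length)
instance (q1 : List Int) (q2 : List Int) (p1 : List Int) (p2 : List Int) : Decidable (Pre_Count3 q1 q2 p1 p2) := by unfold Pre_Count3; infer_instance

def pvWitness_Count3 : List Int × List Int × List Int × List Int := ([1, 3], [2], [5, 4], [6])

def Spec_Count3 (q1 : List Int) (q2 : List Int) (p1 : List Int) (p2 : List Int) (out : Int) : Prop := out = Count3_alt q1 q2 p1 p2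
instance (q1 : List Int) (q2 : List Int) (p1 : List Int) (p2 : List Int) (out : Int) : Decidable (Spec_Count3 q1 q2 p1 p2 out) := by unfold Spec_Count3; infer_instance

-- ===== CLAIM (what is proved, stated in full; the proofs are below) =====
def Claim_equal_Count3 : Prop := ∀ (q1 : List Int) (q2 : List Int) (p1 : List Int) (p2 : List Int), Dom_Count3 q1 q2 p1 p2 → Pre_Count3 q1 q2 p1 p2 → Spec_Count3 q1 q2 p1 p2 (Count3 q1 q2 p1 p2)

-- ===== LEMMAS AND PROOFS =====

-- the common combinatorial value: number of pairs (x, y) ∈ X × Y with x.1 < y.1 and y.2 < x.2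
def pvBrute (X Y : List (Int × Int)) : Nat :=
  (Y.map (fun y => X.countP (fun a => decide (a.1 < y.1 ∧ y.2 < a.2)))).sum

-- index characterisation of countP on a list that is "monotone decreasing" in P
lemma pv_countP_char {α : Type} (P : α → Bool) :
    ∀ (s : List α), s.Pairwise (fun a b => P b = true → P a = true) →
      ∀ i (h : i < s.length), (P s[i] = true ↔ i < s.countP P) := by
  intro s
  induction s with
  | nil => intro _ i h; simp at h
  | cons a tl IH =>
    intro hs i h
    obtain ⟨ha, htl⟩ := List.pairwise_cons.mp hs
    by_cases hPa : P a = true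
    · cases i with
      | zero => simp [hPa]
      | succ i =>
        have h' : i < tl.length := by simpa using h
        have hch := IH htl i h'
        simp only [List.getElem_cons_succ, List.countP_cons, hPa, if_pos]
        rw [hch]
        omega
    · have hz : tl.countP P = 0 :=
        List.countP_eq_zero.mpr (fun b hb hPb => hPa (ha b hb hPb))
      cases i with
      | zero => simp [hPa, hz]
      | succ i =>
        have h' : i < tl.length := by simpa using h
        have hnb : ¬ P tl[i] = true := fun hPb => hPa (ha _ (List.getElem_mem h') hPb)
        simp [hPa, hz, hnb]

-- monotone P: filter = take (countP)
lemma pv_filter_eq_take {α : Type} (P : α → Bool) :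
    ∀ (s : List α), s.Pairwise (fun a b => P b = true → P a = true) →
      s.filter P = s.take (s.countP P) := by
  intro s
  induction s with
  | nil => intro _; simp
  | cons a tl IH =>
    intro hs
    obtain ⟨ha, htl⟩ := List.pairwise_cons.mp hs
    by_cases hPa : P a = true
    · simp [hPa, IH htl]
    · have hz : tl.countP P = 0 :=
        List.countP_eq_zero.mpr (fun b hb hPb => hPa (ha b hb hPb))
      have hfil : tl.filter P = [] :=
        List.filter_eq_nil_iff.mpr (fun b hb hPb => hPa (ha b hb hPb))
      simp [hPa, hz, hfil]

lemma pv_mono_le (x : Int) (s : List Int) (hs : s.Pairwise (· ≤ ·)) :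
    s.Pairwise (fun a b => decide (b ≤ x) = true → decide (a ≤ x) = true) :=
  hs.imp (fun hab h => by
    simp only [decide_eq_true_eq] at h ⊢
    exact le_trans hab h)

lemma pv_mono_fst (qy : Int) (sa : List (Int × Int)) (hsa : sa.Pairwise (fun a b => a.1 ≤ b.1)) :
    sa.Pairwise (fun a b => decide (b.1 < qy) = true → decide (a.1 < qy) = true) :=
  hsa.imp (fun hab h => by
    simp only [decide_eq_true_eq] at h ⊢
    exact lt_of_le_of_lt hab h)

-- bisect correctness on a sorted list
lemma pv_bisAux_eq (s : List Int) (x : Int) (hs : s.Pairwise (· ≤ ·)) :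
    ∀ (n lo hi : Nat), hi - lo ≤ n → hi ≤ s.length →
      lo ≤ s.countP (fun v => decide (v ≤ x)) →
      s.countP (fun v => decide (v ≤ x)) ≤ hi →
      pvBisAux s x n lo hi = s.countP (fun v => decide (v ≤ x)) := by
  intro n
  induction n with
  | zero =>
    intro lo hi hfuel hhi hlo hhi2
    simp only [pvBisAux]
    omega
  | succ n IH =>
    intro lo hi hfuel hhi hlo hhi2
    simp only [pvBisAux]
    by_cases hlt : lo < hi
    · rw [if_pos hlt]
      have hmlo : lo ≤ (lo + hi) / 2 := by omega
      have hmhi : (lo + hi) / 2 < hi := by omega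
      have hmlen : (lo + hi) / 2 < s.length := lt_of_lt_of_le hmhi hhi
      have hg : s.getD ((lo + hi) / 2) 0 = s[(lo + hi) / 2] := List.getD_eq_getElem s 0 hmlen
      have hchar := pv_countP_char (fun v => decide (v ≤ x)) s (pv_mono_le x s hs)
        ((lo + hi) / 2) hmlen
      simp only [decide_eq_true_eq] at hchar
      by_cases hc : s.getD ((lo + hi) / 2) 0 ≤ x
      · rw [if_pos hc]
        refine IH ((lo + hi) / 2 + 1) hi (by omega) hhi ?_ hhi2
        have : (lo + hi) / 2 < s.countP (fun v => decide (v ≤ x)) := hchar.mp (hg ▸ hc)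
        omega
      · rw [if_neg hc]
        refine IH lo ((lo + hi) / 2) (by omega) (le_of_lt hmlen) hlo ?_
        have : ¬ ((lo + hi) / 2 < s.countP (fun v => decide (v ≤ x))) :=
          fun hcl => hc (hg ▸ hchar.mpr hcl)
        omega
    · rw [if_neg hlt]
      omega

lemma pv_bisectRight_eq (s : List Int) (x : Int) (hs : s.Pairwise (· ≤ ·)) :
    pvBisectRight s x = s.countP (fun v => decide (v ≤ x)) := by
  unfold pvBisectRight
  exact pv_bisAux_eq s x hs s.length 0 s.length (by omega) le_rfl (Nat.zero_le _)
    List.countP_le_length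

-- sorted insertion at the bisect position: stays sorted, is a permutation of x :: s
lemma pv_insert_sorted (s : List Int) (x : Int) (hs : s.Pairwise (· ≤ ·)) :
    (PySem.List.insert s (pvBisectRight s x) x).Pairwise (· ≤ ·) ∧
    (PySem.List.insert s (pvBisectRight s x) x).Perm (x :: s) := by
  have ht : s.countP (fun v => decide (v ≤ x)) ≤ s.length := List.countP_le_length
  have hchar := pv_countP_char (fun v => decide (v ≤ x)) s (pv_mono_le x s hs)
  rw [pv_bisectRight_eq s x hs, PySem.List.insert_natCast s _ x ht]
  have htake : ∀ a ∈ s.take (s.countP (fun v => decide (v ≤ x))), a ≤ x := by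
    intro a hmem
    obtain ⟨i, hi, hval⟩ := List.mem_iff_getElem.mp hmem
    have hilen : i < s.length := by
      have := List.length_take (i := s.countP (fun v => decide (v ≤ x))) (l := s)
      omega
    have hit : i < s.countP (fun v => decide (v ≤ x)) := by
      have := List.length_take (i := s.countP (fun v => decide (v ≤ x))) (l := s)
      omega
    have := (hchar i hilen).mpr hit
    simp only [decide_eq_true_eq] at this
    rw [← hval, List.getElem_take]
    exact this
  have hdrop : ∀ b ∈ s.drop (s.countP (fun v => decide (v ≤ x))), x < b := by
    intro b hmem
    obtain ⟨i, hi, hval⟩ := List.mem_iff_getElem.mp hmem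
    rw [List.getElem_drop] at hval
    have hilen : s.countP (fun v => decide (v ≤ x)) + i < s.length := by
      have := List.length_drop (i := s.countP (fun v => decide (v ≤ x))) (l := s)
      omega
    have hnot : ¬ (s.countP (fun v => decide (v ≤ x)) + i <
        s.countP (fun v => decide (v ≤ x))) := by omega
    have := fun hle => hnot ((hchar _ hilen).mp hle)
    rw [← hval]
    refine lt_of_not_ge fun hcon => this ?_
    simpa using hcon
  constructor
  · rw [List.pairwise_append]
    refine ⟨List.Pairwise.sublist (List.take_sublist _ _) hs, ?_, ?_⟩
    · rw [List.pairwise_cons]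
      exact ⟨fun b hb => le_of_lt (hdrop b hb),
        List.Pairwise.sublist (List.drop_sublist _ _) hs⟩
    · intro a hma b hmb
      rcases List.mem_cons.mp hmb with rfl | hmb
      · exact htake a hma
      · exact le_trans (htake a hma) (le_of_lt (hdrop b hmb))
  · have h1 := @List.perm_middle _ x (s.take (s.countP (fun v => decide (v ≤ x))))
      (s.drop (s.countP (fun v => decide (v ≤ x))))
    rwa [List.take_append_drop] at h1

-- counting the elements above a threshold via bisect
lemma pv_count_above (s : List Int) (y : Int) (hs : s.Pairwise (· ≤ ·)) :
    (s.length : Int) - (pvBisectRight s y : Int) = (s.countP (fun v => decide (y < v)) : Int) := by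
  rw [pv_bisectRight_eq s y hs]
  have h2 := List.length_eq_countP_add_countP (fun v => decide (v ≤ y)) (l := s)
  have h3 : s.countP (fun v => decide (y < v)) =
      s.countP (fun a => decide ¬ (decide (a ≤ y) = true)) :=
    List.countP_congr (fun v _ => by
      simp only [decide_eq_true_eq, not_le])
  omega

-- the while loop reaches the q-boundary and maintains the sorted multiset invariant
lemma pv_advance_eq (sa : List (Int × Int)) (qy : Int)
    (hsa : sa.Pairwise (fun a b => a.1 ≤ b.1)) :
    ∀ (n k : Nat) (s : List Int), sa.length - k ≤ n →
      k ≤ sa.countP (fun a => decide (a.1 < qy)) →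
      s.Pairwise (· ≤ ·) → s.Perm ((sa.take k).map Prod.snd) →
      (pvAdvance sa qy n k s).1 = sa.countP (fun a => decide (a.1 < qy)) ∧
      (pvAdvance sa qy n k s).2.Pairwise (· ≤ ·) ∧
      (pvAdvance sa qy n k s).2.Perm
        ((sa.take (sa.countP (fun a => decide (a.1 < qy)))).map Prod.snd) := by
  intro n
  induction n with
  | zero =>
    intro k s hfuel hk hss hsp
    simp only [pvAdvance]
    have hble : sa.countP (fun a => decide (a.1 < qy)) ≤ sa.length := List.countP_le_length
    have hkb : k = sa.countP (fun a => decide (a.1 < qy)) := by omega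
    exact ⟨hkb.symm ▸ rfl, hss, hkb ▸ hsp⟩
  | succ n IH =>
    intro k s hfuel hk hss hsp
    simp only [pvAdvance]
    by_cases hklen : k < sa.length
    · rw [if_pos hklen]
      have hget : sa.getD k (0, 0) = sa[k] := List.getD_eq_getElem sa (0, 0) hklen
      have hchar := pv_countP_char (fun a => decide (a.1 < qy)) sa (pv_mono_fst qy sa hsa)
        k hklen
      simp only [decide_eq_true_eq] at hchar
      by_cases hq : (sa.getD k (0, 0)).1 < qy
      · rw [if_pos hq]
        have hkb : k < sa.countP (fun a => decide (a.1 < qy)) := hchar.mp (hget ▸ hq)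
        obtain ⟨hss', hsp'⟩ := pv_insert_sorted s (sa.getD k (0, 0)).2 hss
        refine IH (k + 1) _ (by omega) (by omega) hss' ?_
        have htk : (sa.take (k + 1)).map Prod.snd =
            (sa.take k).map Prod.snd ++ [(sa.getD k (0, 0)).2] := by
          rw [List.take_add_one, List.getElem?_eq_getElem hklen, hget]
          simp only [Option.toList_some, List.map_append, List.map_cons, List.map_nil]
        rw [htk]
        exact hsp'.trans ((hsp.cons _).trans (List.perm_append_singleton _ _).symm)
      · rw [if_neg hq]
        have hnkb : ¬ k < sa.countP (fun a => decide (a.1 < qy)) :=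
          fun hc => hq (hget ▸ hchar.mpr hc)
        have hkb : k = sa.countP (fun a => decide (a.1 < qy)) := by omega
        exact ⟨hkb.symm ▸ rfl, hss, hkb ▸ hsp⟩
    · rw [if_neg hklen]
      have hble : sa.countP (fun a => decide (a.1 < qy)) ≤ sa.length := List.countP_le_length
      have hkb : k = sa.countP (fun a => decide (a.1 < qy)) := by omega
      exact ⟨hkb.symm ▸ rfl, hss, hkb ▸ hsp⟩

-- the sweep of Source B's _cross, with its invariant
lemma pv_cross_go (sa : List (Int × Int)) (hsa : sa.Pairwise (fun a b => a.1 ≤ b.1)) :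
    ∀ (rest : List (Int × Int)), rest.Pairwise (fun a b => a.1 ≤ b.1) →
      ∀ (k : Nat) (s : List Int) (c : Int),
        (∀ y ∈ rest, k ≤ sa.countP (fun a => decide (a.1 < y.1))) →
        s.Pairwise (· ≤ ·) → s.Perm ((sa.take k).map Prod.snd) →
        (rest.foldl (fun (acc : List Int × Int × Nat) y =>
            let ks := pvAdvance sa y.1 sa.length acc.2.2 acc.1
            (ks.2, acc.2.1 + ((ks.2.length : Int) - (pvBisectRight ks.2 y.2 : Int)), ks.1))
          (s, c, k)).2.1
        = c + ((rest.map (fun y =>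
            sa.countP (fun a => decide (a.1 < y.1 ∧ y.2 < a.2)))).sum : Nat) := by
  intro rest
  induction rest with
  | nil => intro _ k s c _ _ _; simp
  | cons y rest IH =>
    intro hrest k s c hky hss hsp
    obtain ⟨hy, htail⟩ := List.pairwise_cons.mp hrest
    obtain ⟨hk1, hss', hsp'⟩ := pv_advance_eq sa y.1 hsa sa.length k s (by omega)
      (hky y (List.mem_cons_self)) hss hsp
    simp only [List.foldl_cons]
    rw [IH htail _ _ _ ?hky hss' (by rw [hk1]; exact hsp')]
    case hky =>
      intro z hz
      rw [hk1]
      exact List.countP_mono_left (fun a _ h => by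
        simp only [decide_eq_true_eq] at h ⊢
        exact lt_of_lt_of_le h (hy z hz))
    have hcnt : ((pvAdvance sa y.1 sa.length k s).2.length : Int) -
        (pvBisectRight (pvAdvance sa y.1 sa.length k s).2 y.2 : Int)
        = (sa.countP (fun a => decide (a.1 < y.1 ∧ y.2 < a.2)) : Int) := by
      rw [pv_count_above _ y.2 hss']
      congr 1
      rw [hsp'.countP_eq, List.countP_map,
        ← pv_filter_eq_take (fun a => decide (a.1 < y.1)) sa (pv_mono_fst y.1 sa hsa),
        List.countP_filter]
      refine List.countP_congr (fun a _ => ?_)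
      simp only [Function.comp_apply, Bool.and_eq_true, decide_eq_true_eq]
      constructor
      · exact fun h => ⟨h.2, h.1⟩
      · exact fun h => ⟨h.2, h.1⟩
    rw [hcnt]
    simp only [List.map_cons, List.sum_cons]
    push_cast
    ring

lemma pv_cross_eq (sa sb : List (Int × Int))
    (hsa : sa.Pairwise (fun a b => a.1 ≤ b.1)) (hsb : sb.Pairwise (fun a b => a.1 ≤ b.1)) :
    pvCross sa sb = (pvBrute sa sb : Int) := by
  unfold pvCross pvBrute
  rw [pv_cross_go sa hsa sb hsb 0 [] 0 (fun y _ => Nat.zero_le _) List.Pairwise.nil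
    (by simp)]
  simp

-- pvBrute only depends on the two lists up to permutation
lemma pv_brute_perm {X X' Y Y' : List (Int × Int)} (hx : X.Perm X') (hy : Y.Perm Y') :
    pvBrute X Y = pvBrute X' Y' := by
  unfold pvBrute
  rw [show (fun (y : Int × Int) => X.countP (fun a => decide (a.1 < y.1 ∧ y.2 < a.2)))
      = (fun y => X'.countP (fun a => decide (a.1 < y.1 ∧ y.2 < a.2))) from
    funext (fun y => hx.countP_eq _)]
  exact (hy.map _).sum_eq

lemma pv_sum_ite_nat {β : Type} (p : β → Bool) :
    ∀ (l : List β), (l.map (fun b => if p b then 1 else 0)).sum = l.countP p := by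
  intro l
  induction l with
  | nil => simp
  | cons b l IH =>
    simp only [List.map_cons, List.sum_cons, List.countP_cons, IH]
    omega

-- summation swap (double counting)
lemma pv_sum_swap {β γ : Type} (R : β → γ → Bool) :
    ∀ (X : List β) (Y : List γ),
      (X.map (fun a => Y.countP (fun b => R a b))).sum
      = (Y.map (fun b => X.countP (fun a => R a b))).sum := by
  intro X
  induction X with
  | nil =>
    intro Y
    simp only [List.map_nil, List.sum_nil, List.countP_nil]
    exact (List.sum_eq_zero (fun x hx => by
      rcases List.mem_map.mp hx with ⟨b, _, rfl⟩; rfl)).symm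
  | cons a X' IH =>
    intro Y
    simp only [List.map_cons, List.sum_cons, IH]
    rw [show (fun (b : γ) => List.countP (fun a' => R a' b) (a :: X'))
        = (fun b => (if R a b then 1 else 0) + List.countP (fun a' => R a' b) X') from
      funext (fun b => by simp only [List.countP_cons]; omega)]
    rw [List.sum_map_add, pv_sum_ite_nat]

lemma pv_cast_sum {α : Type} (l : List α) (f : α → Nat) :
    (l.map (fun x => (f x : Int))).sum = ((l.map f).sum : Int) := by
  induction l with
  | nil => simp
  | cons x l IH => simp only [List.map_cons, List.sum_cons, IH]; push_cast; ring

lemma pv_pair_sum1 (Y : List (Int × Int)) (a : Int × Int) :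
    (Y.map (fun b => if a.1 > b.1 ∧ a.2 < b.2 then (1 : Int) else 0)).sum
      = (Y.countP (fun b => decide (b.1 < a.1 ∧ a.2 < b.2)) : Int) := by
  induction Y with
  | nil => simp
  | cons b Y IH =>
    simp only [List.map_cons, List.sum_cons, List.countP_cons, IH]
    by_cases h : a.1 > b.1 ∧ a.2 < b.2
    · rw [if_pos h]
      have hd : decide (b.1 < a.1 ∧ a.2 < b.2) = true := by
        simp only [decide_eq_true_eq]; exact h
      simp only [hd]
      push_cast; omega
    · rw [if_neg h]
      have hd : decide (b.1 < a.1 ∧ a.2 < b.2) = false := by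
        simp only [decide_eq_false_iff_not]; exact h
      simp only [hd]
      push_cast; omega

lemma pv_pair_sum2 (Y : List (Int × Int)) (a : Int × Int) :
    (Y.map (fun b => if a.1 < b.1 ∧ a.2 > b.2 then (1 : Int) else 0)).sum
      = (Y.countP (fun b => decide (a.1 < b.1 ∧ b.2 < a.2)) : Int) := by
  induction Y with
  | nil => simp
  | cons b Y IH =>
    simp only [List.map_cons, List.sum_cons, List.countP_cons, IH]
    by_cases h : a.1 < b.1 ∧ a.2 > b.2
    · rw [if_pos h]
      have hd : decide (a.1 < b.1 ∧ b.2 < a.2) = true := by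
        simp only [decide_eq_true_eq]; exact h
      simp only [hd]
      push_cast; omega
    · rw [if_neg h]
      have hd : decide (a.1 < b.1 ∧ b.2 < a.2) = false := by
        simp only [decide_eq_false_iff_not]; exact h
      simp only [hd]
      push_cast; omega

-- a fold over two identically-indexed lists is a fold over their zip
lemma pv_range_map_sum (u v : List Int) (h : u.length ≤ v.length) (f : Int → Int → Int) :
    (PySem.List.pyRange 0 (PySem.List.len u)).map
        (fun i => f (PySem.List.pyGetD u i 0) (PySem.List.pyGetD v i 0))
      = (u.zip v).map (fun a => f a.1 a.2) := by
  apply List.ext_getElem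
  · simp [PySem.List.length_pyRange_one, List.length_zip]
    omega
  · intro k hk1 hk2
    have hku : k < u.length := by
      have := PySem.List.length_pyRange_one 0 (PySem.List.len u)
      simp only [List.length_map] at hk1
      rw [this] at hk1
      simp [PySem.List.len_eq] at hk1
      omega
    have hkv : k < v.length := by omega
    simp only [List.getElem_map]
    rw [PySem.List.getElem_pyRange_one]
    rw [List.getElem_zip]
    simp only [zero_add]
    rw [PySem.List.pyGetD_natCast, PySem.List.pyGetD_natCast,
      List.getD_eq_getElem _ _ hku, List.getD_eq_getElem _ _ hkv]

-- the two-if body of A's inner loop as an additive fold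
lemma pv_foldl_two_ifs {α : Type} (l : List α) (P Q : α → Prop)
    [DecidablePred P] [DecidablePred Q] :
    ∀ c : Int, l.foldl (fun c3 x =>
        let c3 := if P x then c3 + 1 else c3
        if Q x then c3 + 1 else c3) c
      = c + (l.map (fun x => (if P x then (1 : Int) else 0) + (if Q x then (1 : Int) else 0))).sum := by
  induction l with
  | nil => intro c; simp
  | cons x l IH =>
    intro c
    simp only [List.foldl_cons, List.map_cons, List.sum_cons, IH]
    by_cases hP : P x <;> by_cases hQ : Q x <;> simp [hP, hQ] <;> ring

lemma pv_A_eq (q1 q2 p1 p2 : List Int) (hq1 : q1 ≠ []) (hq2 : q2 ≠ [])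
    (h1 : q1.length ≤ p1.length) (h2 : q2.length ≤ p2.length) :
    Count3 q1 q2 p1 p2 =
      (pvBrute (List.zip q2 p2) (List.zip q1 p1) : Int)
      + (pvBrute (List.zip q1 p1) (List.zip q2 p2) : Int) := by
  simp only [Count3]
  have hn : ¬ (PySem.List.len q1 = 0 ∨ PySem.List.len q2 = 0) := by
    rw [PySem.List.len_eq, PySem.List.len_eq]
    rintro (hc | hc)
    · exact hq1 (List.length_eq_zero_iff.mp (Int.natCast_eq_zero.mp hc))
    · exact hq2 (List.length_eq_zero_iff.mp (Int.natCast_eq_zero.mp hc))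
  rw [if_neg hn]
  -- inner loops become sums
  rw [show (fun (c3 : Int) (i : Int) =>
        (PySem.List.pyRange 0 (PySem.List.len q2)).foldl (fun c3 j =>
          let c3 := if PySem.List.pyGetD q1 i 0 > PySem.List.pyGetD q2 j 0 ∧
                       PySem.List.pyGetD p1 i 0 < PySem.List.pyGetD p2 j 0 then c3 + 1 else c3
          if PySem.List.pyGetD q1 i 0 < PySem.List.pyGetD q2 j 0 ∧
             PySem.List.pyGetD p1 i 0 > PySem.List.pyGetD p2 j 0 then c3 + 1 else c3) c3)
      = (fun c3 i => c3 + ((PySem.List.pyRange 0 (PySem.List.len q2)).map (fun j =>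
          (if PySem.List.pyGetD q1 i 0 > PySem.List.pyGetD q2 j 0 ∧
              PySem.List.pyGetD p1 i 0 < PySem.List.pyGetD p2 j 0 then (1 : Int) else 0)
          + (if PySem.List.pyGetD q1 i 0 < PySem.List.pyGetD q2 j 0 ∧
               PySem.List.pyGetD p1 i 0 > PySem.List.pyGetD p2 j 0 then (1 : Int) else 0))).sum)
      from funext fun c3 => funext fun i =>
        pv_foldl_two_ifs (PySem.List.pyRange 0 (PySem.List.len q2))
          (fun j => PySem.List.pyGetD q1 i 0 > PySem.List.pyGetD q2 j 0 ∧
            PySem.List.pyGetD p1 i 0 < PySem.List.pyGetD p2 j 0)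
          (fun j => PySem.List.pyGetD q1 i 0 < PySem.List.pyGetD q2 j 0 ∧
            PySem.List.pyGetD p1 i 0 > PySem.List.pyGetD p2 j 0) c3]
  rw [PySem.List.foldl_add, zero_add]
  -- inner range-sum over (q2, p2) becomes a sum over their zip
  have hin : ∀ a1 a2 : Int,
      ((PySem.List.pyRange 0 (PySem.List.len q2)).map (fun j =>
          (if a1 > PySem.List.pyGetD q2 j 0 ∧ a2 < PySem.List.pyGetD p2 j 0 then (1 : Int) else 0)
          + (if a1 < PySem.List.pyGetD q2 j 0 ∧ a2 > PySem.List.pyGetD p2 j 0 then (1 : Int) else 0)))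
        = (List.zip q2 p2).map (fun b =>
          (if a1 > b.1 ∧ a2 < b.2 then (1 : Int) else 0)
          + (if a1 < b.1 ∧ a2 > b.2 then (1 : Int) else 0)) := by
    intro a1 a2
    have hzz := pv_range_map_sum q2 p2 h2 (fun b1 b2 =>
      (if a1 > b1 ∧ a2 < b2 then (1 : Int) else 0) + (if a1 < b1 ∧ a2 > b2 then (1 : Int) else 0))
    simpa using hzz
  rw [show (fun (i : Int) => ((PySem.List.pyRange 0 (PySem.List.len q2)).map (fun j =>
        (if PySem.List.pyGetD q1 i 0 > PySem.List.pyGetD q2 j 0 ∧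
            PySem.List.pyGetD p1 i 0 < PySem.List.pyGetD p2 j 0 then (1 : Int) else 0)
        + (if PySem.List.pyGetD q1 i 0 < PySem.List.pyGetD q2 j 0 ∧
             PySem.List.pyGetD p1 i 0 > PySem.List.pyGetD p2 j 0 then (1 : Int) else 0))).sum)
      = (fun i => ((List.zip q2 p2).map (fun b =>
        (if PySem.List.pyGetD q1 i 0 > b.1 ∧ PySem.List.pyGetD p1 i 0 < b.2 then (1 : Int) else 0)
        + (if PySem.List.pyGetD q1 i 0 < b.1 ∧ PySem.List.pyGetD p1 i 0 > b.2 then (1 : Int) else 0))).sum)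
      from funext fun i => by rw [hin (PySem.List.pyGetD q1 i 0) (PySem.List.pyGetD p1 i 0)]]
  -- outer range-sum over (q1, p1) becomes a sum over their zip
  have hout := pv_range_map_sum q1 p1 h1 (fun a1 a2 => ((List.zip q2 p2).map (fun b =>
    (if a1 > b.1 ∧ a2 < b.2 then (1 : Int) else 0)
    + (if a1 < b.1 ∧ a2 > b.2 then (1 : Int) else 0))).sum)
  simp only [] at hout
  rw [hout]
  -- split the per-element sum into two counts
  rw [show (fun (a : Int × Int) => ((List.zip q2 p2).map (fun b =>
        (if a.1 > b.1 ∧ a.2 < b.2 then (1 : Int) else 0)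
        + (if a.1 < b.1 ∧ a.2 > b.2 then (1 : Int) else 0))).sum)
      = (fun a => ((List.zip q2 p2).countP (fun b => decide (b.1 < a.1 ∧ a.2 < b.2)) : Int)
          + ((List.zip q2 p2).countP (fun b => decide (a.1 < b.1 ∧ b.2 < a.2)) : Int))
      from funext fun a => by
        rw [List.sum_map_add, pv_pair_sum1 (List.zip q2 p2) a, pv_pair_sum2 (List.zip q2 p2) a]]
  rw [List.sum_map_add, pv_cast_sum, pv_cast_sum]
  unfold pvBrute
  rw [pv_sum_swap (fun (a b : Int × Int) => decide (a.1 < b.1 ∧ b.2 < a.2))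
    (List.zip q1 p1) (List.zip q2 p2)]

lemma pv_B_eq (q1 q2 p1 p2 : List Int) :
    Count3_alt q1 q2 p1 p2 =
      (pvBrute (List.zip q2 p2) (List.zip q1 p1) : Int)
      + (pvBrute (List.zip q1 p1) (List.zip q2 p2) : Int) := by
  simp only [Count3_alt]
  have hs1 : (PySem.List.sorted (List.zip q1 p1) (fun t => t.1)).Pairwise
      (fun a b => a.1 ≤ b.1) := PySem.List.sorted_pairwise _ _
  have hs2 : (PySem.List.sorted (List.zip q2 p2) (fun t => t.1)).Pairwise
      (fun a b => a.1 ≤ b.1) := PySem.List.sorted_pairwise _ _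
  rw [pv_cross_eq _ _ hs1 hs2, pv_cross_eq _ _ hs2 hs1]
  rw [pv_brute_perm (PySem.List.sorted_perm _ _ _) (PySem.List.sorted_perm _ _ _),
    pv_brute_perm (PySem.List.sorted_perm _ _ _) (PySem.List.sorted_perm _ _ _)]
  ring

lemma pv_cross_nil_right (X : List (Int × Int)) : pvCross X [] = 0 := rfl

lemma pv_cross_nil_left (Y : List (Int × Int)) (hY : Y.Pairwise (fun a b => a.1 ≤ b.1)) :
    pvCross [] Y = 0 := by
  rw [pv_cross_eq [] Y List.Pairwise.nil hY]
  unfold pvBrute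
  rw [List.sum_eq_zero (fun x hx => by
    rcases List.mem_map.mp hx with ⟨y, _, rfl⟩; simp)]
  rfl

lemma pv_B_nil1 (q2 p1 p2 : List Int) : Count3_alt [] q2 p1 p2 = 0 := by
  simp only [Count3_alt]
  rw [show List.zip ([] : List Int) p1 = [] from rfl]
  rw [show PySem.List.sorted ([] : List (Int × Int)) (fun t => t.1) = [] from rfl]
  rw [pv_cross_nil_left _ (PySem.List.sorted_pairwise _ _), pv_cross_nil_right]
  ring

lemma pv_B_nil2 (q1 p1 p2 : List Int) : Count3_alt q1 [] p1 p2 = 0 := by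
  simp only [Count3_alt]
  rw [show List.zip ([] : List Int) p2 = [] from rfl]
  rw [show PySem.List.sorted ([] : List (Int × Int)) (fun t => t.1) = [] from rfl]
  rw [pv_cross_nil_left _ (PySem.List.sorted_pairwise _ _), pv_cross_nil_right]
  ring

lemma pv_A_nil1 (q2 p1 p2 : List Int) : Count3 [] q2 p1 p2 = 0 := by
  simp [Count3]

lemma pv_A_nil2 (q1 p1 p2 : List Int) : Count3 q1 [] p1 p2 = 0 := by
  simp [Count3]

-- ===== VERDICT (by name: the statement is the Claim_ definition above) =====
theorem Count3_spec : Claim_equal_Count3 := by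
  intro q1 q2 p1 p2 _ hpre
  unfold Spec_Count3
  by_cases hq1 : q1 = []
  · subst hq1; rw [pv_A_nil1, pv_B_nil1]
  by_cases hq2 : q2 = []
  · subst hq2; rw [pv_A_nil2, pv_B_nil2]
  rcases hpre with h | h | ⟨h1, h2⟩
  · exact absurd h hq1
  · exact absurd h hq2
  · rw [pv_A_eq q1 q2 p1 p2 hq1 hq2 h1 h2, pv_B_eq]
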